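-- pv_equiv track=rewrite | github.com/sfdjsh/Algorithm | 프로그래머스/2/169199. 리코쳇 로봇/리코쳇 로봇.py | solution
-- ===== SOURCE A (Python) =====
-- from collections import deque
--
-- def solution(board):
--
--     di, dj = ((-1, 1, 0, 0), (0, 0, -1, 1))
--
--     board_x = len(board)
--     board_y = len(board[0])
--     visited = [[0] * board_y for _ in range(board_x)]
--
--     sx, sy = 0, 0
--     for i in range(len(board)):
--         if 'R' in board[i]:
--             sx, sy = i, board[i].index('R')
--
--     q = deque()
--     q.append([sx, sy, 0])
--     visited[sx][sy] = 1
--     while q: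
--         x, y, cnt = q.popleft()
--         if board[x][y] == 'G':
--             return cnt
--
--         for i in range(4):
--             dx, dy = x + di[i], y + dj[i]
--             while True:
--                 if 0 <= dx < board_x and 0 <= dy < board_y and board[dx][dy] == 'D':
--                     dx -= di[i]
--                     dy -= dj[i]
--                     break
--
--                 if dx < 0 or dx >= board_x or dy < 0 or dy >= board_y:
--                     dx -= di[i]
--                     dy -= dj[i]
--                     break
--
--                 else:
--                     dx += di[i]
--                     dy += dj[i]
--
--             if not visited[dx][dy]:
--                 q.append([dx, dy, cnt + 1])
--                 visited[dx][dy] = 1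
--
--     return -1
-- ===== SOURCE B (Python) =====
-- from collections import deque
--
-- def solution(board):
--     n, m = len(board), len(board[0])
--     dirs = ((-1, 0), (1, 0), (0, -1), (0, 1))
--
--     def land(i, j, di, dj):
--         while True:
--             ni, nj = i + di, j + dj
--             if not (0 <= ni < n and 0 <= nj < m) or board[ni][nj] == 'D':
--                 return (i, j)
--             i, j = ni, nj
--
--     nxt = [[[land(i, j, di, dj) for di, dj in dirs] for j in range(m)] for i in range(n)]
--
--     si, sj = 0, 0
--     for i in range(n):
--         k = board[i].find('R')
--         if k != -1:
--             si, sj = i, k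
--
--     dist = {(si, sj): 0}
--     q = deque([(si, sj)])
--     while q:
--         x, y = q.popleft()
--         d = dist[(x, y)]
--         if board[x][y] == 'G':
--             return d
--         for p in nxt[x][y]:
--             if p not in dist:
--                 dist[p] = d + 1
--                 q.append(p)
--     return -1
-- ===== Notes on version B (the rewrite author's own statement) =====
-- stated objective: alternative
-- what changed: Instead of re-simulating the slide with an inline while-loop for every dequeued cell and a visited 0/1 matrix, B precomputes a landing table nxt[i][j] (the four slide destinations of every cell) once, and runs the BFS over plain coordinate pairs with a distance dictionary, enumerating neighbors by table lookup.
-- outside the precondition, e.g. on solution(['G', '']): A returns 0, B raises IndexError; on solution(['ab', 'xxxR', 'Rx']): A returns -1, B returns -1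
import Mathlib
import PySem

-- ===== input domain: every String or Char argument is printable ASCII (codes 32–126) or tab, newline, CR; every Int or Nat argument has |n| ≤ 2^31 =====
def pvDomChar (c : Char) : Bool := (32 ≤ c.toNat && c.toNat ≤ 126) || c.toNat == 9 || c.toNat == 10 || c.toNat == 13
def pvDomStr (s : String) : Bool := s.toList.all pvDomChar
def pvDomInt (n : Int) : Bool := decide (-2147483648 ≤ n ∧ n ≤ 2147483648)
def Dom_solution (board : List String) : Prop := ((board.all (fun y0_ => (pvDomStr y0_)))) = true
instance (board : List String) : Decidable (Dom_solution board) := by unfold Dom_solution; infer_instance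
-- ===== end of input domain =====

-- B replaces A's per-visit inline slide simulation and visited matrix by a precomputed
-- landing table plus a distance-dictionary BFS over coordinate pairs (objective: alternative).

-- board[x][y] as an Option Char (none = index out of range)
def pvCell (board : List String) (x y : Int) : Option Char :=
  (PySem.List.pyGet? board x).bind (fun r => PySem.Str.pyGet? r y)

-- fuel for the slide loops; both loops move one cell per iteration inside the grid,
-- so (bx+by).toNat + 2 iterations are never exhausted on inputs satisfying Pre_
def pvSlideFuel (bx by_ : Int) : Nat := (bx + by_).toNat + 2

-- ===== PORT A =====
def pvDi : List Int := [-1, 1, 0, 0]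
def pvDj : List Int := [0, 0, -1, 1]

-- A's inner `while True` slide loop; at fuel 0 (unreachable with pvSlideFuel) it steps back once
def pvSlideA (board : List String) (bx by_ di dj : Int) : Nat → Int × Int → Int × Int
  | 0, p => (p.1 - di, p.2 - dj)
  | fuel+1, p =>
    if 0 ≤ p.1 ∧ p.1 < bx ∧ 0 ≤ p.2 ∧ p.2 < by_ ∧ pvCell board p.1 p.2 = some 'D' then
      (p.1 - di, p.2 - dj)
    else if p.1 < 0 ∨ bx ≤ p.1 ∨ p.2 < 0 ∨ by_ ≤ p.2 then
      (p.1 - di, p.2 - dj)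
    else pvSlideA board bx by_ di dj fuel (p.1 + di, p.2 + dj)

-- visited[i][j] and visited[i][j] = v (total forms; indices are in range on Pre_ inputs)
def pvVget (v : List (List Int)) (i j : Int) : Int :=
  PySem.List.pyGetD (PySem.List.pyGetD v i []) j 0
def pvVset (v : List (List Int)) (i j val : Int) : List (List Int) :=
  PySem.List.pySetD v i (PySem.List.pySetD (PySem.List.pyGetD v i []) j val)

-- A's `while q:` loop; fuel bx*by+1 bounds the number of dequeues (each enqueue marks a fresh cell)
def pvBfsA (board : List String) (bx by_ : Int) :
    Nat → List (Int × Int × Int) → List (List Int) → Int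
  | 0, _, _ => -1
  | _+1, [], _ => -1
  | fuel+1, (x, y, cnt) :: q, visited =>
    if pvCell board x y = some 'G' then cnt
    else
      let st := (PySem.List.pyRange 0 4 1).foldl
        (fun (s : List (Int × Int × Int) × List (List Int)) i =>
          let di := PySem.List.pyGetD pvDi i 0
          let dj := PySem.List.pyGetD pvDj i 0
          let p := pvSlideA board bx by_ di dj (pvSlideFuel bx by_) (x + di, y + dj)
          if pvVget s.2 p.1 p.2 = 0 then (s.1 ++ [(p.1, p.2, cnt + 1)], pvVset s.2 p.1 p.2 1)
          else s) (q, visited)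
      pvBfsA board bx by_ fuel st.1 st.2

def solution (board : List String) : Int :=
  let bx : Int := board.length
  let by_ : Int := PySem.Str.len (board.headD "")   -- len(board[0]); Pre_ excludes []
  let visited := (PySem.List.pyRange 0 bx 1).map (fun _ => List.replicate by_.toNat (0 : Int))
  let s := (PySem.List.enumerate board).foldl
    (fun (acc : Int × Int) p =>
      if PySem.Str.isIn "R" p.2 then (p.1, PySem.Str.find p.2 "R") else acc) (0, 0)
  pvBfsA board bx by_ (bx.toNat * by_.toNat + 1) [(s.1, s.2, 0)] (pvVset visited s.1 s.2 1)

-- ===== PORT B =====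
def pvDirs : List (Int × Int) := [(-1, 0), (1, 0), (0, -1), (0, 1)]

-- B's `land`: look one cell ahead, stop before a 'D' or the border
def pvLand (board : List String) (n m di dj : Int) : Nat → Int × Int → Int × Int
  | 0, p => p
  | fuel+1, p =>
    if ¬(0 ≤ p.1 + di ∧ p.1 + di < n ∧ 0 ≤ p.2 + dj ∧ p.2 + dj < m) ∨
        pvCell board (p.1 + di) (p.2 + dj) = some 'D' then p
    else pvLand board n m di dj fuel (p.1 + di, p.2 + dj)

-- nxt[i][j] = the four landing cells of (i, j)
def pvTable (board : List String) (n m : Int) : List (List (List (Int × Int))) :=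
  (PySem.List.pyRange 0 n 1).map (fun i =>
    (PySem.List.pyRange 0 m 1).map (fun j =>
      pvDirs.map (fun d => pvLand board n m d.1 d.2 (pvSlideFuel n m) (i, j))))

-- B's `while q:` loop over coordinate pairs with the distance dictionary
def pvBfsB (board : List String) (nxt : List (List (List (Int × Int)))) :
    Nat → List (Int × Int) → PySem.Dict (Int × Int) Int → Int
  | 0, _, _ => -1
  | _+1, [], _ => -1
  | fuel+1, (x, y) :: q, dist =>
    let d := dist.getD (x, y) 0   -- dist[(x, y)]; the key is always present
    if pvCell board x y = some 'G' then d
    else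
      let st := (PySem.List.pyGetD (PySem.List.pyGetD nxt x []) y []).foldl
        (fun (s : List (Int × Int) × PySem.Dict (Int × Int) Int) p =>
          if s.2.contains p = false then (s.1 ++ [p], s.2.insert p (d + 1)) else s) (q, dist)
      pvBfsB board nxt fuel st.1 st.2

def solution_alt (board : List String) : Int :=
  let n : Int := board.length
  let m : Int := PySem.Str.len (board.headD "")
  let nxt := pvTable board n m
  let s := (PySem.List.enumerate board).foldl
    (fun (acc : Int × Int) p =>
      let k := PySem.Str.find p.2 "R"
      if k ≠ -1 then (p.1, k) else acc) (0, 0)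
  pvBfsB board nxt (n.toNat * m.toNat + 1) [s] ((PySem.Dict.empty).insert s 0)

-- ===== PRECONDITION & SPEC =====
-- Pre_ excludes empty and zero-width boards and ragged inputs — a row shorter than the first,
-- or a row whose 'R' lies at or beyond the first row's width — on which A generally raises
-- IndexError and any returned value is an accident of which missing cells the BFS touches.
def Pre_solution (board : List String) : Prop :=
  board ≠ [] ∧ 0 < PySem.Str.len (board.headD "") ∧
  ∀ s ∈ board, PySem.Str.len (board.headD "") ≤ PySem.Str.len s ∧
    PySem.Str.find s "R" < PySem.Str.len (board.headD "")
instance (board : List String) : Decidable (Pre_solution board) := by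
  unfold Pre_solution; infer_instance

def pvWitness_solution : List String := ["R.D", "..G", "..."]

def Spec_solution (board : List String) (out : Int) : Prop := out = solution_alt board
instance (board : List String) (out : Int) : Decidable (Spec_solution board out) := by
  unfold Spec_solution; infer_instance

-- ===== CLAIM (what is proved, stated in full; the proofs are below) =====
def Claim_equal_solution : Prop :=
  ∀ (board : List String), Dom_solution board → Pre_solution board →
    Spec_solution board (solution board)

-- ===== LEMMAS AND PROOFS =====

theorem pv_slide_eq (board : List String) (bx by_ di dj : Int) :
    ∀ (f : Nat) (x y : Int),
      pvSlideA board bx by_ di dj f (x + di, y + dj) = pvLand board bx by_ di dj f (x, y) := by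
  intro f
  induction f with
  | zero => intro x y; simp [pvSlideA, pvLand]
  | succ f ih =>
    intro x y
    simp only [pvSlideA, pvLand]
    by_cases hD : pvCell board (x + di) (y + dj) = some 'D'
    · by_cases hin : 0 ≤ x + di ∧ x + di < bx ∧ 0 ≤ y + dj ∧ y + dj < by_
      · rw [if_pos ⟨hin.1, hin.2.1, hin.2.2.1, hin.2.2.2, hD⟩, if_pos (Or.inr hD)]
        simp
      · rw [if_neg (by tauto), if_pos (by omega), if_pos (Or.inl hin)]
        simp
    · by_cases hin : 0 ≤ x + di ∧ x + di < bx ∧ 0 ≤ y + dj ∧ y + dj < by_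
      · rw [if_neg (by tauto), if_neg (by omega), if_neg (by tauto)]
        exact ih (x + di) (y + dj)
      · rw [if_neg (by tauto), if_pos (by omega), if_pos (Or.inl hin)]
        simp

-- land never leaves the grid
theorem pv_land_inrange (board : List String) (n m di dj : Int) :
    ∀ (f : Nat) (p : Int × Int), 0 ≤ p.1 → p.1 < n → 0 ≤ p.2 → p.2 < m →
      0 ≤ (pvLand board n m di dj f p).1 ∧ (pvLand board n m di dj f p).1 < n ∧
      0 ≤ (pvLand board n m di dj f p).2 ∧ (pvLand board n m di dj f p).2 < m := by
  intro f
  induction f with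
  | zero => intro p h1 h2 h3 h4; simp [pvLand]; omega
  | succ f ih =>
    intro p h1 h2 h3 h4
    simp only [pvLand]
    split
    · exact ⟨h1, h2, h3, h4⟩
    · rename_i hc
      push Not at hc
      exact ih (p.1 + di, p.2 + dj) hc.1.1 hc.1.2.1 hc.1.2.2.1 hc.1.2.2.2

theorem pv_table_lookup (board : List String) (n m x y : Int)
    (hx0 : 0 ≤ x) (hxn : x < n) (hy0 : 0 ≤ y) (hym : y < m) :
    PySem.List.pyGetD (PySem.List.pyGetD (pvTable board n m) x []) y [] =
      pvDirs.map (fun d => pvLand board n m d.1 d.2 (pvSlideFuel n m) (x, y)) := by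
  unfold pvTable
  rw [PySem.List.pyGetD_map_pyRange_of_nonneg _ _ _ _ hx0 hxn,
      PySem.List.pyGetD_map_pyRange_of_nonneg _ _ _ _ hy0 hym]

-- shape of the visited matrix
def pvShape (n m : Int) (v : List (List Int)) : Prop :=
  v.length = n.toNat ∧ ∀ r ∈ v, r.length = m.toNat

theorem pv_shape_vset (n m i j val : Int) (v : List (List Int)) (h : pvShape n m v)
    (hi0 : 0 ≤ i) (hin : i < n) (hj0 : 0 ≤ j) : pvShape n m (pvVset v i j val) := by
  obtain ⟨h1, h2⟩ := h
  have hil : i.toNat < v.length := by omega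
  unfold pvVset
  rw [PySem.List.pySetD_of_nonneg _ _ hi0]
  constructor
  · rw [List.length_set]; exact h1
  · intro r hr
    rcases List.mem_or_eq_of_mem_set hr with h | h
    · exact h2 r h
    · subst h
      rw [PySem.List.pyGetD_eq_getElem _ _ hi0 (by omega),
          PySem.List.pySetD_of_nonneg _ _ hj0, List.length_set]
      exact h2 _ (List.getElem_mem hil)

theorem pv_vget_vset (n m : Int) (v : List (List Int)) (h : pvShape n m v)
    (i j a b : Int) (hi0 : 0 ≤ i) (hin : i < n) (hj0 : 0 ≤ j) (hjm : j < m)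
    (ha0 : 0 ≤ a) (han : a < n) (hb0 : 0 ≤ b) (hbm : b < m) (val : Int) :
    pvVget (pvVset v i j val) a b = if a = i ∧ b = j then val else pvVget v a b := by
  obtain ⟨h1, h2⟩ := h
  have hil : i.toNat < v.length := by omega
  have hal : a.toNat < v.length := by omega
  have hrowi : v[i.toNat].length = m.toNat := h2 _ (List.getElem_mem hil)
  have hrowa : v[a.toNat].length = m.toNat := h2 _ (List.getElem_mem hal)
  unfold pvVget pvVset
  rw [PySem.List.pySetD_of_nonneg _ _ hi0, PySem.List.pySetD_of_nonneg _ _ hj0,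
      PySem.List.pyGetD_eq_getElem _ _ hi0 (by omega),
      PySem.List.pyGetD_eq_getElem (v.set i.toNat (v[i.toNat].set j.toNat val)) []
        ha0 (by rw [List.length_set]; omega),
      PySem.List.pyGetD_eq_getElem v [] ha0 (by omega),
      List.getElem_set]
  by_cases hai : a = i
  · subst hai
    rw [if_pos rfl, PySem.List.pyGetD_eq_getElem _ _ hb0 (by rw [List.length_set]; omega),
        PySem.List.pyGetD_eq_getElem _ _ hb0 (by omega), List.getElem_set]
    by_cases hbj : b = j
    · subst hbj; simp
    · rw [if_neg (by omega), if_neg (by tauto)]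
  · rw [if_neg (by omega), if_neg (by tauto)]

-- vget of the all-zero matrix
theorem pv_vget_init (n m a b : Int) (ha0 : 0 ≤ a) (han : a < n) (hb0 : 0 ≤ b) (hbm : b < m) :
    pvVget ((PySem.List.pyRange 0 n 1).map (fun _ => List.replicate m.toNat (0 : Int))) a b
      = 0 := by
  unfold pvVget
  rw [PySem.List.pyGetD_map_pyRange_of_nonneg _ _ _ _ ha0 han,
      PySem.List.pyGetD_eq_getElem _ _ hb0 (by simp; omega)]
  simp

-- the simulation invariant: visited matrix ≍ dist keys, A-queue ≍ B-queue with its distances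
def pvRel (n m : Int) (v : List (List Int)) (dist : PySem.Dict (Int × Int) Int) : Prop :=
  pvShape n m v ∧
  ∀ a b : Int, 0 ≤ a → a < n → 0 ≤ b → b < m →
    (pvVget v a b ≠ 0 ↔ dist.contains (a, b) = true)

def pvQRel (n m : Int) (dist : PySem.Dict (Int × Int) Int)
    (qA : List (Int × Int × Int)) (qB : List (Int × Int)) : Prop :=
  qA = qB.map (fun p => (p.1, p.2, dist.getD p 0)) ∧
  ∀ p ∈ qB, dist.contains p = true ∧ 0 ≤ p.1 ∧ p.1 < n ∧ 0 ≤ p.2 ∧ p.2 < m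

-- the two per-neighbor relaxation steps, as named functions
def pvStepA (c : Int) (s : List (Int × Int × Int) × List (List Int)) (p : Int × Int) :
    List (Int × Int × Int) × List (List Int) :=
  if pvVget s.2 p.1 p.2 = 0 then (s.1 ++ [(p.1, p.2, c + 1)], pvVset s.2 p.1 p.2 1) else s

def pvStepB (c : Int) (s : List (Int × Int) × PySem.Dict (Int × Int) Int) (p : Int × Int) :
    List (Int × Int) × PySem.Dict (Int × Int) Int :=
  if s.2.contains p = false then (s.1 ++ [p], s.2.insert p (c + 1)) else s

theorem pv_relax_one (n m c : Int) (p : Int × Int)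
    (hp : 0 ≤ p.1 ∧ p.1 < n ∧ 0 ≤ p.2 ∧ p.2 < m)
    (qA : List (Int × Int × Int)) (qB : List (Int × Int))
    (v : List (List Int)) (dist : PySem.Dict (Int × Int) Int)
    (hrel : pvRel n m v dist) (hq : pvQRel n m dist qA qB) :
    pvRel n m (pvStepA c (qA, v) p).2 (pvStepB c (qB, dist) p).2 ∧
    pvQRel n m (pvStepB c (qB, dist) p).2 (pvStepA c (qA, v) p).1 (pvStepB c (qB, dist) p).1 := by
  obtain ⟨hp1, hp2, hp3, hp4⟩ := hp
  obtain ⟨hshape, hiff⟩ := hrel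
  obtain ⟨hmap, hmem⟩ := hq
  by_cases hc : dist.contains p = true
  · -- already visited: both skip
    have hv : pvVget v p.1 p.2 ≠ 0 := (hiff p.1 p.2 hp1 hp2 hp3 hp4).mpr (by simpa using hc)
    have e1 : pvStepA c (qA, v) p = (qA, v) := by simp [pvStepA, hv]
    have e2 : pvStepB c (qB, dist) p = (qB, dist) := by simp [pvStepB, hc]
    rw [e1, e2]
    exact ⟨⟨hshape, hiff⟩, hmap, hmem⟩
  · -- fresh cell: A enqueues and marks, B enqueues and inserts
    have hcf : dist.contains p = false := by simpa using hc
    have hv : pvVget v p.1 p.2 = 0 := by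
      by_contra hne
      exact hc ((hiff p.1 p.2 hp1 hp2 hp3 hp4).mp hne)
    have e1 : pvStepA c (qA, v) p = (qA ++ [(p.1, p.2, c + 1)], pvVset v p.1 p.2 1) := by
      simp [pvStepA, hv]
    have e2 : pvStepB c (qB, dist) p = (qB ++ [p], dist.insert p (c + 1)) := by
      simp [pvStepB, hcf]
    rw [e1, e2]
    refine ⟨⟨pv_shape_vset n m p.1 p.2 1 v ⟨hshape.1, hshape.2⟩ hp1 hp2 hp3, ?_⟩, ?_, ?_⟩
    · intro a b ha0 han hb0 hbm
      rw [pv_vget_vset n m v ⟨hshape.1, hshape.2⟩ p.1 p.2 a b hp1 hp2 hp3 hp4 ha0 han hb0 hbm 1,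
          PySem.Dict.contains_insert]
      by_cases hab : (a, b) = p
      · have : a = p.1 ∧ b = p.2 := by rw [Prod.ext_iff] at hab; exact hab
        simp [this]
      · have : ¬ (a = p.1 ∧ b = p.2) := by
          intro hh; exact hab (Prod.ext_iff.mpr ⟨hh.1, hh.2⟩)
        rw [if_neg this]
        simp [hiff a b ha0 han hb0 hbm, hab]
    · -- queue map correspondence
      rw [hmap]
      dsimp only
      rw [List.map_append]
      congr 1
      · apply List.map_congr_left
        intro q hq
        have hqne : q ≠ p := by
          intro hqp; subst hqp
          rw [(hmem q hq).1] at hcf; exact absurd hcf (by simp)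
        rw [PySem.Dict.getD_insert_of_ne _ _ _ hqne]
      · simp [PySem.Dict.getD_insert_self]
    · intro q hqmem
      rcases List.mem_append.mp hqmem with h | h
      · obtain ⟨h1, h2⟩ := hmem q h
        refine ⟨?_, h2⟩
        rw [PySem.Dict.contains_insert, h1]
        simp
      · have : q = p := by simpa using h
        subst this
        exact ⟨PySem.Dict.contains_insert_self _ _ _, hp1, hp2, hp3, hp4⟩

theorem pv_relax_list (n m c : Int) (ps : List (Int × Int)) :
    (∀ p ∈ ps, 0 ≤ p.1 ∧ p.1 < n ∧ 0 ≤ p.2 ∧ p.2 < m) →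
    ∀ (qA : List (Int × Int × Int)) (qB : List (Int × Int))
      (v : List (List Int)) (dist : PySem.Dict (Int × Int) Int),
      pvRel n m v dist → pvQRel n m dist qA qB →
      pvRel n m (ps.foldl (pvStepA c) (qA, v)).2 (ps.foldl (pvStepB c) (qB, dist)).2 ∧
      pvQRel n m (ps.foldl (pvStepB c) (qB, dist)).2
        (ps.foldl (pvStepA c) (qA, v)).1 (ps.foldl (pvStepB c) (qB, dist)).1 := by
  induction ps with
  | nil => intro _ qA qB v dist h1 h2; exact ⟨h1, h2⟩
  | cons p ps ih =>
    intro hps qA qB v dist h1 h2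
    have hstep := pv_relax_one n m c p (hps p (List.mem_cons_self)) qA qB v dist h1 h2
    simp only [List.foldl_cons]
    exact ih (fun q hq => hps q (List.mem_cons_of_mem _ hq))
      (pvStepA c (qA, v) p).1 (pvStepB c (qB, dist) p).1
      (pvStepA c (qA, v) p).2 (pvStepB c (qB, dist) p).2 hstep.1 hstep.2

-- A's direction loop is the relaxation fold over the landing cells of (x, y)
theorem pv_Afold_eq (board : List String) (n m x y c : Int)
    (qA : List (Int × Int × Int)) (v : List (List Int)) :
    (PySem.List.pyRange 0 4 1).foldl
      (fun (s : List (Int × Int × Int) × List (List Int)) i =>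
        let di := PySem.List.pyGetD pvDi i 0
        let dj := PySem.List.pyGetD pvDj i 0
        let p := pvSlideA board n m di dj (pvSlideFuel n m) (x + di, y + dj)
        if pvVget s.2 p.1 p.2 = 0 then (s.1 ++ [(p.1, p.2, c + 1)], pvVset s.2 p.1 p.2 1)
        else s) (qA, v)
    = (pvDirs.map (fun d => pvLand board n m d.1 d.2 (pvSlideFuel n m) (x, y))).foldl
        (pvStepA c) (qA, v) := by
  have h0 : PySem.List.pyRange 0 4 1 = [0, 1, 2, 3] := by decide
  rw [h0]
  simp only [List.foldl_cons, List.foldl_nil, pvDirs, List.map_cons, List.map_nil,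
    pvStepA, pv_slide_eq,
    show PySem.List.pyGetD pvDi 0 0 = -1 from by decide,
    show PySem.List.pyGetD pvDi 1 0 = 1 from by decide,
    show PySem.List.pyGetD pvDi 2 0 = 0 from by decide,
    show PySem.List.pyGetD pvDi 3 0 = 0 from by decide,
    show PySem.List.pyGetD pvDj 0 0 = 0 from by decide,
    show PySem.List.pyGetD pvDj 1 0 = 0 from by decide,
    show PySem.List.pyGetD pvDj 2 0 = -1 from by decide,
    show PySem.List.pyGetD pvDj 3 0 = 1 from by decide]

theorem pv_bfs_eq (board : List String) (n m : Int) :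
    ∀ (fuel : Nat) (qA : List (Int × Int × Int)) (qB : List (Int × Int))
      (v : List (List Int)) (dist : PySem.Dict (Int × Int) Int),
      pvRel n m v dist → pvQRel n m dist qA qB →
      pvBfsA board n m fuel qA v = pvBfsB board (pvTable board n m) fuel qB dist := by
  intro fuel
  induction fuel with
  | zero => intro qA qB v dist _ _; simp [pvBfsA, pvBfsB]
  | succ f ih =>
    intro qA qB v dist h1 h2
    obtain ⟨hmap, hmem⟩ := h2
    cases qB with
    | nil => subst hmap; simp [pvBfsA, pvBfsB]
    | cons p qB' =>
      obtain ⟨x, y⟩ := p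
      have hmem0 := hmem (x, y) (by simp)
      subst hmap
      simp only [List.map_cons, pvBfsA, pvBfsB]
      by_cases hg : pvCell board x y = some 'G'
      · rw [if_pos hg, if_pos hg]
      · rw [if_neg hg, if_neg hg]
        set c := dist.getD (x, y) 0 with hc
        set ps := pvDirs.map
          (fun d => pvLand board n m d.1 d.2 (pvSlideFuel n m) (x, y)) with hps
        have hpsin : ∀ q ∈ ps, 0 ≤ q.1 ∧ q.1 < n ∧ 0 ≤ q.2 ∧ q.2 < m := by
          intro q hq
          rw [hps] at hq
          obtain ⟨d, _, hdq⟩ := List.mem_map.mp hq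
          subst hdq
          have := pv_land_inrange board n m d.1 d.2 (pvSlideFuel n m) (x, y)
            hmem0.2.1 hmem0.2.2.1 hmem0.2.2.2.1 hmem0.2.2.2.2
          exact this
        have hq' : pvQRel n m dist (List.map (fun p => (p.1, p.2, dist.getD p 0)) qB') qB' :=
          ⟨rfl, fun q hq => hmem q (List.mem_cons_of_mem _ hq)⟩
        have hfold := pv_relax_list n m c ps hpsin
          (List.map (fun p => (p.1, p.2, dist.getD p 0)) qB') qB' v dist h1 hq'
        rw [pv_Afold_eq board n m x y c, ← hps,
            pv_table_lookup board n m x y hmem0.2.1 hmem0.2.2.1 hmem0.2.2.2.1 hmem0.2.2.2.2,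
            ← hps]
        exact ih _ _ _ _ hfold.1 hfold.2

theorem pv_start_eq (board : List String) :
    (PySem.List.enumerate board).foldl
      (fun (acc : Int × Int) p =>
        if PySem.Str.isIn "R" p.2 then (p.1, PySem.Str.find p.2 "R") else acc) (0, 0) =
    (PySem.List.enumerate board).foldl
      (fun (acc : Int × Int) p =>
        let k := PySem.Str.find p.2 "R"
        if k ≠ -1 then (p.1, k) else acc) (0, 0) := by
  have hfun : (fun (acc : Int × Int) (p : Int × String) =>
      if PySem.Str.isIn "R" p.2 then (p.1, PySem.Str.find p.2 "R") else acc) =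
      (fun (acc : Int × Int) (p : Int × String) =>
        let k := PySem.Str.find p.2 "R"
        if k ≠ -1 then (p.1, k) else acc) := by
    funext acc p
    by_cases h : ("R".toList <:+: p.2.toList)
    · rw [if_pos ((PySem.Str.isIn_iff_infix _ _).mpr h),
          if_pos ((PySem.Str.find_ne_neg_one_iff _ _).mpr h)]
    · rw [if_neg (fun hc => h ((PySem.Str.isIn_iff_infix _ _).mp hc)),
          if_neg (by simpa using fun hc => h ((PySem.Str.find_ne_neg_one_iff _ _).mp hc))]
  rw [hfun]

theorem pv_mem_enumerate {α : Type} (l : List α) :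
    ∀ (s : Int) (p : Int × α), p ∈ PySem.List.enumerate l s →
      s ≤ p.1 ∧ p.1 < s + l.length ∧ p.2 ∈ l := by
  induction l with
  | nil => intro s p hp; simp [PySem.List.enumerate_nil] at hp
  | cons x xs ih =>
    intro s p hp
    rw [PySem.List.enumerate_cons] at hp
    rcases List.mem_cons.mp hp with h | h
    · subst h; refine ⟨le_refl _, by simp, by simp⟩
    · obtain ⟨h1, h2, h3⟩ := ih (s + 1) p h
      simp at h2 ⊢
      refine ⟨by omega, by omega, Or.inr h3⟩

theorem pv_start_inrange (board : List String) (h : Pre_solution board) :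
    0 ≤ ((PySem.List.enumerate board).foldl
      (fun (acc : Int × Int) p =>
        if PySem.Str.isIn "R" p.2 then (p.1, PySem.Str.find p.2 "R") else acc) (0, 0)).1 ∧
    ((PySem.List.enumerate board).foldl
      (fun (acc : Int × Int) p =>
        if PySem.Str.isIn "R" p.2 then (p.1, PySem.Str.find p.2 "R") else acc) (0, 0)).1
      < (board.length : Int) ∧
    0 ≤ ((PySem.List.enumerate board).foldl
      (fun (acc : Int × Int) p =>
        if PySem.Str.isIn "R" p.2 then (p.1, PySem.Str.find p.2 "R") else acc) (0, 0)).2 ∧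
    ((PySem.List.enumerate board).foldl
      (fun (acc : Int × Int) p =>
        if PySem.Str.isIn "R" p.2 then (p.1, PySem.Str.find p.2 "R") else acc) (0, 0)).2
      < PySem.Str.len (board.headD "") := by
  obtain ⟨hne, hm, hrows⟩ := h
  set n : Int := (board.length : Int)
  set m : Int := PySem.Str.len (board.headD "")
  have haux : ∀ (l : List (Int × String)) (acc : Int × Int),
      (∀ p ∈ l, 0 ≤ p.1 ∧ p.1 < n ∧ PySem.Str.find p.2 "R" < m) →
      (0 ≤ acc.1 ∧ acc.1 < n ∧ 0 ≤ acc.2 ∧ acc.2 < m) →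
      (0 ≤ (l.foldl (fun (acc : Int × Int) p =>
          if PySem.Str.isIn "R" p.2 then (p.1, PySem.Str.find p.2 "R") else acc) acc).1 ∧
        (l.foldl (fun (acc : Int × Int) p =>
          if PySem.Str.isIn "R" p.2 then (p.1, PySem.Str.find p.2 "R") else acc) acc).1 < n ∧
        0 ≤ (l.foldl (fun (acc : Int × Int) p =>
          if PySem.Str.isIn "R" p.2 then (p.1, PySem.Str.find p.2 "R") else acc) acc).2 ∧
        (l.foldl (fun (acc : Int × Int) p =>
          if PySem.Str.isIn "R" p.2 then (p.1, PySem.Str.find p.2 "R") else acc) acc).2 < m) := by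
    intro l
    induction l with
    | nil => intro acc _ hacc; exact hacc
    | cons p l ihl =>
      intro acc hl hacc
      simp only [List.foldl_cons]
      refine ihl _ (fun q hq => hl q (List.mem_cons_of_mem _ hq)) ?_
      by_cases hin : PySem.Str.isIn "R" p.2 = true
      · rw [if_pos hin]
        have hfind0 : 0 ≤ PySem.Str.find p.2 "R" :=
          (PySem.Str.find_nonneg_iff _ _).mpr ((PySem.Str.isIn_iff_infix _ _).mp hin)
        have hp := hl p (List.mem_cons_self)
        exact ⟨hp.1, hp.2.1, hfind0, hp.2.2⟩
      · rw [if_neg hin]; exact hacc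
  apply haux
  · intro p hp
    obtain ⟨h1, h2, h3⟩ := pv_mem_enumerate board 0 p hp
    refine ⟨h1, by simpa using h2, (hrows p.2 h3).2⟩
  · have h0n : 0 < n := by
      have : board.length ≠ 0 := fun hc => hne (List.eq_nil_of_length_eq_zero hc)
      simp only [n]; omega
    exact ⟨le_refl _, h0n, le_refl _, hm⟩

-- initial invariant at the start cell
theorem pv_init_inv (board : List String) (sp : Int × Int)
    (hs : 0 ≤ sp.1 ∧ sp.1 < (board.length : Int) ∧ 0 ≤ sp.2 ∧
          sp.2 < PySem.Str.len (board.headD "")) :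
    pvRel (board.length : Int) (PySem.Str.len (board.headD ""))
      (pvVset ((PySem.List.pyRange 0 (board.length : Int) 1).map
        (fun _ => List.replicate (PySem.Str.len (board.headD "")).toNat (0 : Int)))
        sp.1 sp.2 1)
      (PySem.Dict.empty.insert sp 0) ∧
    pvQRel (board.length : Int) (PySem.Str.len (board.headD ""))
      (PySem.Dict.empty.insert sp 0) [(sp.1, sp.2, 0)] [sp] := by
  set n : Int := (board.length : Int)
  set m : Int := PySem.Str.len (board.headD "")
  obtain ⟨hs1, hs2, hs3, hs4⟩ := hs
  have hshape : pvShape n m ((PySem.List.pyRange 0 n 1).map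
      (fun _ => List.replicate m.toNat (0 : Int))) := by
    constructor
    · rw [List.length_map, PySem.List.length_pyRange_one]; simp
    · intro r hr
      obtain ⟨_, _, hr'⟩ := List.mem_map.mp hr
      rw [← hr', List.length_replicate]
  refine ⟨⟨pv_shape_vset n m sp.1 sp.2 1 _ hshape hs1 hs2 hs3, ?_⟩, ?_, ?_⟩
  · intro a b ha0 han hb0 hbm
    rw [pv_vget_vset n m _ hshape sp.1 sp.2 a b hs1 hs2 hs3 hs4 ha0 han hb0 hbm 1,
        PySem.Dict.contains_insert]
    by_cases hab : (a, b) = sp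
    · have : a = sp.1 ∧ b = sp.2 := by rw [Prod.ext_iff] at hab; exact hab
      simp [this]
    · have h2 : ¬ (a = sp.1 ∧ b = sp.2) := fun hh => hab (Prod.ext_iff.mpr ⟨hh.1, hh.2⟩)
      rw [if_neg h2, pv_vget_init n m a b ha0 han hb0 hbm]
      simp [hab]
  · simp [PySem.Dict.getD_insert_self]
  · intro q hq
    have : q = sp := by simpa using hq
    subst this
    exact ⟨PySem.Dict.contains_insert_self _ _ _, hs1, hs2, hs3, hs4⟩

-- ===== VERDICT (by name: the statement is the Claim_ definition above) =====
theorem solution_spec : Claim_equal_solution := by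
  intro board _ hpre
  unfold Spec_solution solution solution_alt
  simp only []
  rw [← pv_start_eq board]
  have hstart := pv_start_inrange board hpre
  set sp := (PySem.List.enumerate board).foldl
    (fun (acc : Int × Int) p =>
      if PySem.Str.isIn "R" p.2 then (p.1, PySem.Str.find p.2 "R") else acc) (0, 0) with hsp
  have hinv := pv_init_inv board sp ⟨hstart.1, hstart.2.1, hstart.2.2.1, hstart.2.2.2⟩
  exact pv_bfs_eq board (board.length : Int) (PySem.Str.len (board.headD "")) _
    [(sp.1, sp.2, 0)] [sp] _ _ hinv.1 hinv.2
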